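-- pv_equiv track=rewrite | github.com/HiralJain112/DAA-codes | Policeman_catches_thieves_problem.py | PoliceThiefFunc
-- ===== SOURCE A (Python) =====
-- def PoliceThiefFunc(arr, length, k):
-- 	i = left = right = 0
--
-- 	result = 0
-- 	thief_lst = []
-- 	police_lst = []
--
-- 	while i < length:
-- 		if arr[i] == 'P':
-- 			police_lst.append(i)
-- 		elif arr[i] == 'T':
-- 			thief_lst.append(i)
-- 		i += 1
--
-- 	while left < len(thief_lst) and right < len(police_lst):
--
-- 		if (abs( thief_lst[left] - police_lst[right] ) <= k):
-- 			result += 1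
-- 			left += 1
-- 			right += 1
--
-- 		elif thief_lst[left] < police_lst[right]:
-- 			left += 1
-- 		else:
-- 			right += 1
--
-- 	return result
-- ===== SOURCE B (Python) =====
-- def PoliceThiefFunc(arr, length, k):
--     result = 0
--     police_q = []
--     thief_q = []
--     for i in range(length):
--         c = arr[i]
--         if c == 'P':
--             while thief_q and i - thief_q[0] > k:
--                 thief_q.pop(0)
--             if thief_q:
--                 result += 1
--                 thief_q.pop(0)
--             else:
--                 police_q.append(i)
--         elif c == 'T':
--             while police_q and i - police_q[0] > k:
--                 police_q.pop(0)
--             if police_q: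
--                 result += 1
--                 police_q.pop(0)
--             else:
--                 thief_q.append(i)
--     return result
-- ===== Notes on version B (the rewrite author's own statement) =====
-- stated objective: alternative
-- what changed: Replaces A's two-phase approach (collect all police/thief indices into two lists, then a two-pointer greedy over them) by a single online pass maintaining queues of unmatched police/thief indices, evicting out-of-range fronts and matching on arrival.
import Mathlib
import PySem

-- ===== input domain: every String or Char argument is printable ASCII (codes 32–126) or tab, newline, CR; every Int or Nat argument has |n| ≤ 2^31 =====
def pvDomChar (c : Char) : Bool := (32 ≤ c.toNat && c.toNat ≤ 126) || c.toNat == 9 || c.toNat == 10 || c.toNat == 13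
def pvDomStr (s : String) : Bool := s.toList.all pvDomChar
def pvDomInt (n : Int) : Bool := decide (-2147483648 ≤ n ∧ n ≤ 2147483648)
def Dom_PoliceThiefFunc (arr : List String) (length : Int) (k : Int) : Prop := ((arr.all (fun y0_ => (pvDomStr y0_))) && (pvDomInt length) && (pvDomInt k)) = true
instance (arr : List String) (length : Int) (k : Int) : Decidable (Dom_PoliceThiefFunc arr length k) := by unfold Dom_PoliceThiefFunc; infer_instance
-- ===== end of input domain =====

-- B replaces A's collect-then-two-pointer greedy by a single online pass with
-- two queues of unmatched indices (alternative decomposition, same cost).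

-- ===== PORT A =====
-- first while loop of A: scan indices, collecting (police_lst, thief_lst)
def paStep (arr : List String) (st : List Int × List Int) (i : Int) : List Int × List Int :=
  match PySem.List.pyGet? arr i with
  | none => st     -- arr[i] raises IndexError in Python; excluded by Pre_
  | some s => if s = "P" then (st.1 ++ [i], st.2) else if s = "T" then (st.1, st.2 ++ [i]) else st

-- second while loop of A: two-pointer greedy over thief_lst/police_lst
def paMatch (thief police : List Int) (k left right result : Int) : Int :=
  if h : left < (thief.length : Int) ∧ right < (police.length : Int) then
    let t := (PySem.List.pyGet? thief left).getD 0
    let p := (PySem.List.pyGet? police right).getD 0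
    if |t - p| ≤ k then paMatch thief police k (left + 1) (right + 1) (result + 1)
    else if t < p then paMatch thief police k (left + 1) right result
    else paMatch thief police k left (right + 1) result
  else result
termination_by ((thief.length : Int) + (police.length : Int) - left - right).toNat
decreasing_by all_goals omega

def PoliceThiefFunc (arr : List String) (length : Int) (k : Int) : Int :=
  let st := (PySem.List.pyRange 0 length 1).foldl (paStep arr) ([], [])
  paMatch st.2 st.1 k 0 0 0

-- ===== PORT B =====
-- the 'while q and i - q[0] > k: q.pop(0)' eviction loop
def pbEvict (k i : Int) (q : List Int) : List Int :=
  match q with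
  | [] => []
  | x :: xs => if i - x > k then pbEvict k i xs else x :: xs

-- one iteration of B's for-loop; state = (result, police_q, thief_q)
def pbStep (arr : List String) (k : Int) (st : Int × List Int × List Int) (i : Int) : Int × List Int × List Int :=
  match PySem.List.pyGet? arr i with
  | none => st     -- arr[i] raises IndexError in Python; excluded by Pre_
  | some c =>
    if c = "P" then
      match pbEvict k i st.2.2 with
      | _ :: rest => (st.1 + 1, st.2.1, rest)
      | [] => (st.1, st.2.1 ++ [i], [])
    else if c = "T" then
      match pbEvict k i st.2.1 with
      | _ :: rest => (st.1 + 1, rest, st.2.2)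
      | [] => (st.1, [], st.2.2 ++ [i])
    else st

def PoliceThiefFunc_alt (arr : List String) (length : Int) (k : Int) : Int :=
  ((PySem.List.pyRange 0 length 1).foldl (pbStep arr k) (0, [], [])).1

-- ===== PRECONDITION & SPEC =====
-- Pre_ excludes exactly the inputs where Python A raises IndexError: the scan
-- reads arr[i] for 0 ≤ i < length, so it raises iff length > len(arr).
def Pre_PoliceThiefFunc (arr : List String) (length : Int) (k : Int) : Prop :=
  length ≤ (arr.length : Int)
instance (arr : List String) (length : Int) (k : Int) : Decidable (Pre_PoliceThiefFunc arr length k) := by unfold Pre_PoliceThiefFunc; infer_instance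

def pvWitness_PoliceThiefFunc : List String × Int × Int := (["P", "T", "X", "T"], 4, 2)

def Spec_PoliceThiefFunc (arr : List String) (length : Int) (k : Int) (out : Int) : Prop := out = PoliceThiefFunc_alt arr length k
instance (arr : List String) (length : Int) (k : Int) (out : Int) : Decidable (Spec_PoliceThiefFunc arr length k out) := by unfold Spec_PoliceThiefFunc; infer_instance

-- ===== CLAIM (what is proved, stated in full; the proofs are below) =====
def Claim_equal_PoliceThiefFunc : Prop := ∀ (arr : List String) (length : Int) (k : Int), Dom_PoliceThiefFunc arr length k → Pre_PoliceThiefFunc arr length k → Spec_PoliceThiefFunc arr length k (PoliceThiefFunc arr length k)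

-- ===== LEMMAS AND PROOFS =====

-- reference greedy: two-pointer run returning (matches, leftover thieves, leftover police)
def gRun (k : Int) : List Int → List Int → Int × List Int × List Int
  | ts, [] => (0, ts, [])
  | [], p :: ps => (0, [], p :: ps)
  | t :: ts, p :: ps =>
    if |t - p| ≤ k then ((gRun k ts ps).1 + 1, (gRun k ts ps).2)
    else if t < p then gRun k ts (p :: ps)
    else gRun k (t :: ts) ps
termination_by ts ps => ts.length + ps.length

lemma gRun_nil_right (k : Int) (ts : List Int) : gRun k ts [] = (0, ts, []) := by
  cases ts <;> rw [gRun]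

lemma gRun_nil_left (k : Int) (ps : List Int) : gRun k [] ps = (0, [], ps) := by
  cases ps <;> rw [gRun]

-- one of the two leftover lists is always empty
lemma gRun_leftover (k : Int) : ∀ ts ps, (gRun k ts ps).2.1 = [] ∨ (gRun k ts ps).2.2 = [] := by
  intro ts ps
  induction ts, ps using gRun.induct k with
  | case1 ts => rw [gRun_nil_right]; right; rfl
  | case2 p ps => rw [gRun_nil_left]; left; rfl
  | case3 t ts p ps h ih =>
    rw [gRun]; simp only [h, if_true]; exact ih
  | case4 t ts p ps h h2 ih =>
    rw [gRun]; simp only [h, if_false, h2, if_true]; exact ih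
  | case5 t ts p ps h h2 ih =>
    rw [gRun]; simp only [h, if_false, h2]; exact ih

-- A's indexed two-pointer loop computes gRun's count on the dropped suffixes
lemma paMatch_gRun (ts ps : List Int) (k : Int) :
    ∀ (n l r : Nat) (res : Int), ts.length - l + (ps.length - r) ≤ n →
      paMatch ts ps k (l : Int) (r : Int) res = res + (gRun k (ts.drop l) (ps.drop r)).1 := by
  intro n
  induction n with
  | zero =>
    intro l r res hn
    have h1 : ts.length ≤ l := by omega
    have h2 : ps.length ≤ r := by omega
    rw [paMatch, dif_neg (by omega), List.drop_eq_nil_of_le h1, gRun_nil_left]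
    simp
  | succ n ih =>
    intro l r res hn
    rw [paMatch]
    by_cases hc : (l : Int) < (ts.length : Int) ∧ (r : Int) < (ps.length : Int)
    · rw [dif_pos hc]
      have hl : l < ts.length := by exact_mod_cast hc.1
      have hr : r < ps.length := by exact_mod_cast hc.2
      have hgt : (PySem.List.pyGet? ts (l : Int)).getD 0 = ts[l] := by
        rw [PySem.List.pyGet?_natCast]; simp [List.getElem?_eq_getElem hl]
      have hgp : (PySem.List.pyGet? ps (r : Int)).getD 0 = ps[r] := by
        rw [PySem.List.pyGet?_natCast]; simp [List.getElem?_eq_getElem hr]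
      simp only [hgt, hgp]
      rw [List.drop_eq_getElem_cons hl, List.drop_eq_getElem_cons hr, gRun]
      by_cases hm : |ts[l] - ps[r]| ≤ k
      · simp only [hm, if_true]
        have := ih (l + 1) (r + 1) (res + 1) (by omega)
        push_cast at this
        rw [this]; ring
      · simp only [hm, if_false]
        by_cases hlt : ts[l] < ps[r]
        · simp only [hlt, if_true]
          have := ih (l + 1) r res (by omega)
          push_cast at this
          rw [this, ← List.drop_eq_getElem_cons hr]
        · simp only [hlt, if_false]
          have := ih l (r + 1) res (by omega)
          push_cast at this
          rw [this, ← List.drop_eq_getElem_cons hl]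
    · rw [dif_neg hc]
      have : ts.length ≤ l ∨ ps.length ≤ r := by push_cast at hc; omega
      rcases this with h | h
      · rw [List.drop_eq_nil_of_le h, gRun_nil_left]; simp
      · rw [List.drop_eq_nil_of_le h, gRun_nil_right]; simp

-- a single thief j arriving after everything in ps: gRun is evict-then-match
lemma gRun_single_T (k j : Int) : ∀ (ps : List Int), (∀ x ∈ ps, x < j) →
    gRun k [j] ps = match pbEvict k j ps with
                    | [] => (0, [j], [])
                    | _ :: rest => (1, [], rest) := by
  intro ps
  induction ps with
  | nil => intro _; rw [gRun_nil_right]; rfl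
  | cons p ps ih =>
    intro h
    have hpj : p < j := h p (by simp)
    rw [gRun]
    by_cases hm : |j - p| ≤ k
    · have : ¬ (j - p > k) := by rw [abs_of_pos (by omega)] at hm; omega
      simp only [hm, if_true, pbEvict, this, if_false, gRun_nil_left]; norm_num
    · have hgt : j - p > k := by rw [abs_of_pos (by omega)] at hm; omega
      have hnlt : ¬ j < p := by omega
      simp only [hm, if_false, hnlt, pbEvict, hgt, if_true]
      exact ih (fun x hx => h x (by simp [hx]))

lemma gRun_single_P (k j : Int) : ∀ (ts : List Int), (∀ x ∈ ts, x < j) →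
    gRun k ts [j] = match pbEvict k j ts with
                    | [] => (0, [], [j])
                    | _ :: rest => (1, rest, []) := by
  intro ts
  induction ts with
  | nil => intro _; rw [gRun_nil_left]; rfl
  | cons t ts ih =>
    intro h
    have htj : t < j := h t (by simp)
    rw [gRun]
    by_cases hm : |t - j| ≤ k
    · have : ¬ (j - t > k) := by rw [abs_of_neg (by omega)] at hm; omega
      simp only [hm, if_true, pbEvict, this, if_false, gRun_nil_right]; norm_num
    · have hgt : j - t > k := by rw [abs_of_neg (by omega)] at hm; omega
      simp only [hm, if_false, htj, if_true, pbEvict, hgt]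
      exact ih (fun x hx => h x (by simp [hx]))

-- gRun is online: appending a new latest thief resumes from the final state
lemma gRun_append_T (k j : Int) : ∀ (ts ps : List Int), (∀ x ∈ ts, x < j) → (∀ x ∈ ps, x < j) →
    gRun k (ts ++ [j]) ps =
      match gRun k ts ps with
      | (c, [], lp) => (match pbEvict k j lp with
                        | [] => (c, [j], [])
                        | _ :: rest => (c + 1, [], rest))
      | (c, t :: lt, _) => (c, (t :: lt) ++ [j], []) := by
  intro ts ps
  induction ts, ps using gRun.induct k with
  | case1 ts =>
    intro _ _
    rw [gRun_nil_right, gRun_nil_right]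
    cases ts with
    | nil => simp [pbEvict]
    | cons t lt => rfl
  | case2 p ps =>
    intro _ hps
    rw [List.nil_append, gRun_single_T k j _ hps, gRun_nil_left]
    cases hpe : pbEvict k j (p :: ps) <;> simp [hpe]
  | case3 t ts p ps h ih =>
    intro hts hps
    rw [List.cons_append, gRun, gRun]
    simp only [h, if_true]
    rw [ih (fun x hx => hts x (by simp [hx])) (fun x hx => hps x (by simp [hx]))]
    rcases hr : gRun k ts ps with ⟨c, lt, lp⟩
    cases lt with
    | nil => cases hpe : pbEvict k j lp <;> simp [hpe]
    | cons t' lt' => simp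
  | case4 t ts p ps h h2 ih =>
    intro hts hps
    rw [List.cons_append, gRun, gRun]
    simp only [h, if_false, h2, if_true]
    exact ih (fun x hx => hts x (by simp [hx])) hps
  | case5 t ts p ps h h2 ih =>
    intro hts hps
    rw [List.cons_append, gRun, gRun]
    simp only [h, if_false, h2]
    rw [← List.cons_append]
    exact ih hts (fun x hx => hps x (by simp [hx]))

lemma gRun_append_P (k j : Int) : ∀ (ts ps : List Int), (∀ x ∈ ts, x < j) → (∀ x ∈ ps, x < j) →
    gRun k ts (ps ++ [j]) =
      match gRun k ts ps with
      | (c, lt, []) => (match pbEvict k j lt with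
                        | [] => (c, [], [j])
                        | _ :: rest => (c + 1, rest, []))
      | (c, _, p :: lp) => (c, [], (p :: lp) ++ [j]) := by
  intro ts ps
  induction ts, ps using gRun.induct k with
  | case1 ts =>
    intro hts _
    rw [List.nil_append, gRun_single_P k j _ hts, gRun_nil_right]
    cases hpe : pbEvict k j ts <;> simp [hpe]
  | case2 p ps =>
    intro _ _
    rw [gRun_nil_left, gRun_nil_left]
  | case3 t ts p ps h ih =>
    intro hts hps
    rw [List.cons_append, gRun, gRun]
    simp only [h, if_true]
    rw [ih (fun x hx => hts x (by simp [hx])) (fun x hx => hps x (by simp [hx]))]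
    rcases hr : gRun k ts ps with ⟨c, lt, lp⟩
    cases lp with
    | nil => cases hpe : pbEvict k j lt <;> simp [hpe]
    | cons p' lp' => simp
  | case4 t ts p ps h h2 ih =>
    intro hts hps
    rw [List.cons_append, gRun, gRun]
    simp only [h, if_false, h2, if_true]
    rw [← List.cons_append]
    exact ih (fun x hx => hts x (by simp [hx])) hps
  | case5 t ts p ps h h2 ih =>
    intro hts hps
    rw [List.cons_append, gRun, gRun]
    simp only [h, if_false, h2]
    exact ih hts (fun x hx => hps x (by simp [hx]))

-- one scan step preserves the simulation between A's lists and B's state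
lemma step_sim (arr : List String) (k i : Int) (pol thf : List Int) (res : Int) (pq tq : List Int)
    (hp : ∀ x ∈ pol, x < i) (ht : ∀ x ∈ thf, x < i)
    (hg : gRun k thf pol = (res, tq, pq)) :
    gRun k (paStep arr (pol, thf) i).2 (paStep arr (pol, thf) i).1 =
      ((pbStep arr k (res, pq, tq) i).1, (pbStep arr k (res, pq, tq) i).2.2, (pbStep arr k (res, pq, tq) i).2.1) := by
  have hone : tq = [] ∨ pq = [] := by
    have h := gRun_leftover k thf pol
    rw [hg] at h; exact h
  cases hget : PySem.List.pyGet? arr i with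
  | none => simp [paStep, pbStep, hget, hg]
  | some c =>
    by_cases hP : c = "P"
    · have hA : paStep arr (pol, thf) i = (pol ++ [i], thf) := by simp [paStep, hget, hP]
      rw [hA]
      rw [show ((pol ++ [i], thf) : List Int × List Int).2 = thf from rfl,
          show ((pol ++ [i], thf) : List Int × List Int).1 = pol ++ [i] from rfl]
      rw [gRun_append_P k i thf pol ht hp, hg]
      cases pq with
      | nil =>
        cases hpe : pbEvict k i tq with
        | nil => simp [pbStep, hget, hP, hpe]
        | cons t rest => simp [pbStep, hget, hP, hpe]
      | cons p lp =>
        have htq : tq = [] := by rcases hone with h | h; exact h; simp at h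
        subst htq
        simp [pbStep, hget, hP, pbEvict]
    · by_cases hT : c = "T"
      · have hA : paStep arr (pol, thf) i = (pol, thf ++ [i]) := by simp [paStep, hget, hT]
        rw [hA]
        rw [show ((pol, thf ++ [i]) : List Int × List Int).2 = thf ++ [i] from rfl,
            show ((pol, thf ++ [i]) : List Int × List Int).1 = pol from rfl]
        rw [gRun_append_T k i thf pol ht hp, hg]
        cases tq with
        | nil =>
          cases hpe : pbEvict k i pq with
          | nil => simp [pbStep, hget, hT, hpe]
          | cons p rest => simp [pbStep, hget, hT, hpe]
        | cons t lt =>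
          have hpq : pq = [] := by rcases hone with h | h; simp at h; exact h
          subst hpq
          simp [pbStep, hget, hT, pbEvict]
      · simp [paStep, pbStep, hget, hP, hT, hg]

-- elements added by a scan step are bounded by later indices
lemma paStep_lt (arr : List String) (st : List Int × List Int) (i j : Int)
    (h1 : ∀ x ∈ st.1, x < j) (h2 : ∀ x ∈ st.2, x < j) (hij : i < j) :
    (∀ x ∈ (paStep arr st i).1, x < j) ∧ (∀ x ∈ (paStep arr st i).2, x < j) := by
  unfold paStep
  cases PySem.List.pyGet? arr i with
  | none => exact ⟨h1, h2⟩
  | some c =>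
    dsimp only
    split_ifs <;> refine ⟨?_, ?_⟩ <;> intro x hx <;>
      first
      | exact h1 x hx
      | exact h2 x hx
      | (rcases List.mem_append.mp hx with hx | hx
         · first | exact h1 x hx | exact h2 x hx
         · simp at hx; omega)

-- the full-scan invariant
lemma fold_inv (arr : List String) (k : Int) : ∀ (l : List Int) (pol thf : List Int) (res : Int) (pq tq : List Int),
    l.Pairwise (· < ·) →
    (∀ j ∈ l, ∀ x ∈ pol, x < j) → (∀ j ∈ l, ∀ x ∈ thf, x < j) →
    gRun k thf pol = (res, tq, pq) →
    gRun k (l.foldl (paStep arr) (pol, thf)).2 (l.foldl (paStep arr) (pol, thf)).1 =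
      ((l.foldl (pbStep arr k) (res, pq, tq)).1,
       (l.foldl (pbStep arr k) (res, pq, tq)).2.2,
       (l.foldl (pbStep arr k) (res, pq, tq)).2.1) := by
  intro l
  induction l with
  | nil =>
    intro pol thf res pq tq _ _ _ hg
    simpa using hg
  | cons i l ih =>
    intro pol thf res pq tq hpw hpol hthf hg
    simp only [List.foldl_cons]
    obtain ⟨hpw1, hpw2⟩ := List.pairwise_cons.mp hpw
    have hs := step_sim arr k i pol thf res pq tq (hpol i (by simp)) (hthf i (by simp)) hg
    exact ih (paStep arr (pol, thf) i).1 (paStep arr (pol, thf) i).2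
      (pbStep arr k (res, pq, tq) i).1 (pbStep arr k (res, pq, tq) i).2.1 (pbStep arr k (res, pq, tq) i).2.2
      hpw2
      (fun j hj => (paStep_lt arr (pol, thf) i j (hpol j (by simp [hj])) (hthf j (by simp [hj])) (hpw1 j hj)).1)
      (fun j hj => (paStep_lt arr (pol, thf) i j (hpol j (by simp [hj])) (hthf j (by simp [hj])) (hpw1 j hj)).2)
      hs

-- ===== VERDICT (by name: the statement is the Claim_ definition above) =====
theorem PoliceThiefFunc_spec : Claim_equal_PoliceThiefFunc := by
  intro arr length k _ _
  unfold Spec_PoliceThiefFunc PoliceThiefFunc PoliceThiefFunc_alt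
  have hinv := fold_inv arr k (PySem.List.pyRange 0 length 1) [] [] 0 [] []
    (PySem.List.pairwise_lt_pyRange_one 0 length) (by simp) (by simp) (by rw [gRun_nil_left])
  have hm := paMatch_gRun ((PySem.List.pyRange 0 length 1).foldl (paStep arr) ([], [])).2
    ((PySem.List.pyRange 0 length 1).foldl (paStep arr) ([], [])).1 k
    (((PySem.List.pyRange 0 length 1).foldl (paStep arr) ([], [])).2.length +
      ((PySem.List.pyRange 0 length 1).foldl (paStep arr) ([], [])).1.length) 0 0 0 (by omega)
  simp only [Nat.cast_zero, List.drop_zero, zero_add] at hm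
  rw [hm, hinv]
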